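-- pv_equiv track=rewrite | github.com/ccsum19/algorithm_study | boj/1107.py | check
-- ===== SOURCE A (Python) =====
-- def check(num, broken):
--     num_minus = num
--     num_plus = num
--
--     while num_minus in broken:
--         num_minus -= 1
--
--     while num_plus in broken:
--         num_plus += 1
--
--     if abs(num - num_minus) <= abs(num - num_plus):
--         return num_minus
--     else:
--         return num_plus
-- ===== SOURCE B (Python) =====
-- def check(num, broken):
--     d = 0
--     while True:
--         if num - d not in broken:
--             return num - d
--         if num + d not in broken:
--             return num + d
--         d += 1
-- ===== Notes on version B (the rewrite author's own statement) =====
-- stated objective: alternative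
-- what changed: Replaces the two independent full scans (all the way down, then all the way up) plus a final distance comparison with a single outward-expanding loop that tests num-d then num+d for d=0,1,2,... and returns at the first free value, stopping early instead of always completing both scans.
import Mathlib
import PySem

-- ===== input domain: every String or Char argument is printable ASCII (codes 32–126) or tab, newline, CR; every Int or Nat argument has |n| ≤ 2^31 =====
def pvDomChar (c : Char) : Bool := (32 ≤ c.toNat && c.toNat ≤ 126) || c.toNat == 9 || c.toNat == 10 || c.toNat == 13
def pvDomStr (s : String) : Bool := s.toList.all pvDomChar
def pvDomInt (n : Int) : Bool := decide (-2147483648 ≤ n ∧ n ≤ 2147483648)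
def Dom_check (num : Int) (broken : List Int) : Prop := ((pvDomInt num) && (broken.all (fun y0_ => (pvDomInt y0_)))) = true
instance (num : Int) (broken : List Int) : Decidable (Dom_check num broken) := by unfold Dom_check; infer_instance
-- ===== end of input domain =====

-- B replaces A's two independent full scans (all the way down, then all the way up, then compare
-- distances) with ONE outward-expanding loop testing num-d then num+d for d = 0,1,2,…, returning
-- at the first free value (alternative decomposition; same results, early stop).

-- lemmas the ports need for termination (cited in decreasing_by)
lemma pvFilterLeMono (t : List Int) (a b : Int) (hab : a ≤ b) :
    (t.filter (fun x => x ≤ a)).length ≤ (t.filter (fun x => x ≤ b)).length := by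
  induction t with
  | nil => simp
  | cons c t ih =>
    simp only [List.filter_cons]
    by_cases h1 : c ≤ a
    · rw [if_pos (by simp [h1]), if_pos (by simp only [decide_eq_true_eq]; omega)]
      simpa using ih
    · by_cases h2 : c ≤ b
      · rw [if_neg (by simp [h1]), if_pos (by simp [h2])]
        simp only [List.length_cons]; omega
      · rw [if_neg (by simp [h1]), if_neg (by simp [h2])]
        exact ih

lemma pvFilterGeMono (t : List Int) (a b : Int) (hab : b ≤ a) :
    (t.filter (fun x => a ≤ x)).length ≤ (t.filter (fun x => b ≤ x)).length := by
  induction t with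
  | nil => simp
  | cons c t ih =>
    simp only [List.filter_cons]
    by_cases h1 : a ≤ c
    · rw [if_pos (by simp [h1]), if_pos (by simp only [decide_eq_true_eq]; omega)]
      simpa using ih
    · by_cases h2 : b ≤ c
      · rw [if_neg (by simp [h1]), if_pos (by simp [h2])]
        simp only [List.length_cons]; omega
      · rw [if_neg (by simp [h1]), if_neg (by simp [h2])]
        exact ih

lemma pvFilterLeDec (l : List Int) (a : Int) (h : a ∈ l) :
    (l.filter (fun x => x ≤ a - 1)).length < (l.filter (fun x => x ≤ a)).length := by
  induction l with
  | nil => cases h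
  | cons c t ih =>
    simp only [List.filter_cons]
    rcases List.mem_cons.mp h with rfl | hb
    · rw [if_neg (by simp only [decide_eq_true_eq]; omega), if_pos (by simp)]
      have := pvFilterLeMono t (a - 1) a (by omega)
      simp only [List.length_cons]; omega
    · have := ih hb
      by_cases h1 : c ≤ a - 1
      · rw [if_pos (by simp [h1]), if_pos (by simp only [decide_eq_true_eq]; omega)]
        simp only [List.length_cons]; omega
      · by_cases h2 : c ≤ a
        · rw [if_neg (by simp [h1]), if_pos (by simp [h2])]
          simp only [List.length_cons]; omega
        · rw [if_neg (by simp [h1]), if_neg (by simp [h2])]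
          exact this

lemma pvFilterGeDec (l : List Int) (a : Int) (h : a ∈ l) :
    (l.filter (fun x => a + 1 ≤ x)).length < (l.filter (fun x => a ≤ x)).length := by
  induction l with
  | nil => cases h
  | cons c t ih =>
    simp only [List.filter_cons]
    rcases List.mem_cons.mp h with rfl | hb
    · rw [if_neg (by simp only [decide_eq_true_eq]; omega), if_pos (by simp)]
      have := pvFilterGeMono t (a + 1) a (by omega)
      simp only [List.length_cons]; omega
    · have := ih hb
      by_cases h1 : a + 1 ≤ c
      · rw [if_pos (by simp [h1]), if_pos (by simp only [decide_eq_true_eq]; omega)]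
        simp only [List.length_cons]; omega
      · by_cases h2 : a ≤ c
        · rw [if_neg (by simp [h1]), if_pos (by simp [h2])]
          simp only [List.length_cons]; omega
        · rw [if_neg (by simp [h1]), if_neg (by simp [h2])]
          exact this

-- ===== PORT A =====
-- while num_minus in broken: num_minus -= 1
def downScan (broken : List Int) (m : Int) : Int :=
  if h : m ∈ broken then downScan broken (m - 1) else m
termination_by (broken.filter (fun x => x ≤ m)).length
decreasing_by simpa using pvFilterLeDec broken m h

-- while num_plus in broken: num_plus += 1
def upScan (broken : List Int) (m : Int) : Int :=
  if h : m ∈ broken then upScan broken (m + 1) else m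
termination_by (broken.filter (fun x => m ≤ x)).length
decreasing_by simpa using pvFilterGeDec broken m h

def check (num : Int) (broken : List Int) : Int :=
  let num_minus := downScan broken num
  let num_plus := upScan broken num
  if |num - num_minus| ≤ |num - num_plus| then num_minus else num_plus

-- ===== PORT B =====
-- single outward-expanding loop: test num-d, then num+d, for d = 0,1,2,…
-- (the loop counter d only ever holds 0,1,2,…, so it is carried as a Nat)
def altLoop (num : Int) (broken : List Int) (d : Nat) : Int :=
  if hm : (num - (d : Int)) ∉ broken then num - (d : Int)
  else if (num + (d : Int)) ∉ broken then num + (d : Int)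
  else altLoop num broken (d + 1)
termination_by (broken.filter (fun x => x ≤ num - (d : Int))).length
decreasing_by
  have h := pvFilterLeDec broken (num - (d : Int)) (not_not.mp hm)
  have e : num - ((d : Int) + 1) = num - (d : Int) - 1 := by ring
  simpa [e] using h

def check_alt (num : Int) (broken : List Int) : Int :=
  altLoop num broken 0

-- ===== PRECONDITION & SPEC =====
def Spec_check (num : Int) (broken : List Int) (out : Int) : Prop := out = check_alt num broken
instance (num : Int) (broken : List Int) (out : Int) : Decidable (Spec_check num broken out) := by unfold Spec_check; infer_instance

-- ===== CLAIM (what is proved, stated in full; the proofs are below) =====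
def Claim_equal_check : Prop := ∀ (num : Int) (broken : List Int), Dom_check num broken → Spec_check num broken (check num broken)

-- ===== LEMMAS AND PROOFS =====

lemma downScan_le (broken : List Int) (m : Int) : downScan broken m ≤ m := by
  fun_induction downScan broken m with
  | case1 m h ih => omega
  | case2 m h => omega

lemma upScan_ge (broken : List Int) (m : Int) : m ≤ upScan broken m := by
  fun_induction upScan broken m with
  | case1 m h ih => omega
  | case2 m h => omega

lemma downScan_spec (broken : List Int) :
    ∀ (d : Nat) (m : Int), (∀ k : Nat, k < d → (m - (k : Int)) ∈ broken) →
      (m - (d : Int)) ∉ broken → downScan broken m = m - (d : Int) := by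
  intro d
  induction d with
  | zero =>
    intro m _ h0
    rw [downScan]
    simp only [Nat.cast_zero, sub_zero] at h0 ⊢
    simp [h0]
  | succ j ih =>
    intro m hall hd
    have hm : m ∈ broken := by simpa using hall 0 (by omega)
    rw [downScan]
    simp only [hm, dif_pos]
    have := ih (m - 1) (fun k hk => by
      have := hall (k + 1) (by omega)
      have e : m - 1 - (k : Int) = m - ((k : Int) + 1) := by ring
      simpa [e] using this)
      (by
        have e : m - 1 - (j : Int) = m - ((j : Int) + 1) := by ring
        simpa [e] using hd)
    rw [this]; push_cast; ring

lemma upScan_spec (broken : List Int) :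
    ∀ (d : Nat) (m : Int), (∀ k : Nat, k < d → (m + (k : Int)) ∈ broken) →
      (m + (d : Int)) ∉ broken → upScan broken m = m + (d : Int) := by
  intro d
  induction d with
  | zero =>
    intro m _ h0
    rw [upScan]
    simp only [Nat.cast_zero, add_zero] at h0 ⊢
    simp [h0]
  | succ j ih =>
    intro m hall hd
    have hm : m ∈ broken := by simpa using hall 0 (by omega)
    rw [upScan]
    simp only [hm, dif_pos]
    have := ih (m + 1) (fun k hk => by
      have := hall (k + 1) (by omega)
      have e : m + 1 + (k : Int) = m + ((k : Int) + 1) := by ring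
      simpa [e] using this)
      (by
        have e : m + 1 + (j : Int) = m + ((j : Int) + 1) := by ring
        simpa [e] using hd)
    rw [this]; push_cast; ring

lemma upScan_lb (broken : List Int) :
    ∀ (d : Nat) (m : Int), (∀ k : Nat, k < d → (m + (k : Int)) ∈ broken) →
      m + (d : Int) ≤ upScan broken m := by
  intro d
  induction d with
  | zero => intro m _; simpa using upScan_ge broken m
  | succ j ih =>
    intro m hall
    have hm : m ∈ broken := by simpa using hall 0 (by omega)
    rw [upScan]
    simp only [hm, dif_pos]
    have := ih (m + 1) (fun k hk => by
      have := hall (k + 1) (by omega)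
      have e : m + 1 + (k : Int) = m + ((k : Int) + 1) := by ring
      simpa [e] using this)
    push_cast
    omega

lemma downScan_ub (broken : List Int) :
    ∀ (d : Nat) (m : Int), (∀ k : Nat, k ≤ d → (m - (k : Int)) ∈ broken) →
      downScan broken m ≤ m - (d : Int) - 1 := by
  intro d
  induction d with
  | zero =>
    intro m hall
    have hm : m ∈ broken := by simpa using hall 0 (by omega)
    rw [downScan]
    simp only [hm, dif_pos]
    have := downScan_le broken (m - 1)
    omega
  | succ j ih =>
    intro m hall
    have hm : m ∈ broken := by simpa using hall 0 (by omega)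
    rw [downScan]
    simp only [hm, dif_pos]
    have := ih (m - 1) (fun k hk => by
      have := hall (k + 1) (by omega)
      have e : m - 1 - (k : Int) = m - ((k : Int) + 1) := by ring
      simpa [e] using this)
    push_cast
    omega

lemma altLoop_eq : ∀ (num : Int) (broken : List Int) (d : Nat),
    (∀ k : Nat, k < d → (num - (k : Int)) ∈ broken ∧ (num + (k : Int)) ∈ broken) →
    altLoop num broken d = check num broken := by
  intro num broken d
  induction d using altLoop.induct num broken with
  | case1 d hm =>
    intro hinv
    have hdown : downScan broken num = num - (d : Int) :=
      downScan_spec broken d num (fun k hk => (hinv k hk).1) hm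
    have hup : num + (d : Int) ≤ upScan broken num :=
      upScan_lb broken d num (fun k hk => (hinv k hk).2)
    rw [altLoop, dif_pos hm]
    symm
    show check num broken = num - (d : Int)
    unfold check
    rw [hdown]
    dsimp only
    have e1 : |num - (num - (d : Int))| = (d : Int) := by
      rw [show num - (num - (d : Int)) = (d : Int) by ring, abs_of_nonneg (by positivity)]
    have hge : num ≤ upScan broken num := upScan_ge broken num
    have e2 : |num - upScan broken num| = upScan broken num - num := by
      rw [abs_sub_comm, abs_of_nonneg (by omega)]
    rw [e1, e2, if_pos (by omega)]
  | case2 d hm hp =>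
    intro hinv
    rw [not_not] at hm
    have hup : upScan broken num = num + (d : Int) :=
      upScan_spec broken d num (fun k hk => (hinv k hk).2) hp
    have hdown : downScan broken num ≤ num - (d : Int) - 1 := by
      apply downScan_ub broken d num
      intro k hk
      rcases Nat.lt_or_ge k d with h | h
      · exact (hinv k h).1
      · have : k = d := by omega
        subst this; exact hm
    rw [altLoop, dif_neg (not_not_intro hm), if_pos hp]
    symm
    show check num broken = num + (d : Int)
    unfold check
    rw [hup]
    dsimp only
    have hle : downScan broken num ≤ num := downScan_le broken num
    have e1 : |num - downScan broken num| = num - downScan broken num := by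
      rw [abs_of_nonneg (by omega)]
    have e2 : |num - (num + (d : Int))| = (d : Int) := by
      rw [show num - (num + (d : Int)) = -(d : Int) by ring, abs_neg,
        abs_of_nonneg (by positivity)]
    rw [e1, e2, if_neg (by omega)]
  | case3 d hm hp ih =>
    intro hinv
    rw [not_not] at hm hp
    rw [altLoop, dif_neg (not_not_intro hm), if_neg (not_not_intro hp)]
    apply ih
    intro k hk
    rcases Nat.lt_or_ge k d with h | h
    · exact hinv k h
    · have : k = d := by omega
      subst this; exact ⟨hm, hp⟩

-- ===== VERDICT (by name: the statement is the Claim_ definition above) =====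
theorem check_spec : Claim_equal_check := by
  intro num broken _
  show check num broken = check_alt num broken
  exact (altLoop_eq num broken 0 (fun k hk => absurd hk (by omega))).symm
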